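-- pv_equiv track=rewrite | github.com/AbdulSaleh/dialog-probing | parlai/tasks/dailydialog_augmented/nlpaugmentation.py | combine_examples
-- ===== SOURCE A (Python) =====
-- def combine_examples(examples):
--   return [
--     first_example + second_example for idx,first_example in enumerate(
--         examples
--     ) for jdx, second_example in enumerate(
--         examples
--     ) if idx != jdx
--   ]
-- ===== SOURCE B (Python) =====
-- def combine_examples(examples):
--     # Build the FULL Cartesian product (including the self-pairs), then delete
--     # the diagonal entries (positions i*n+i) back-to-front: no per-pair filter runs.
--     n = len(examples)
--     flat = [a + b for a in examples for b in examples]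
--     for i in range(n - 1, -1, -1):
--         del flat[i * n + i]
--     return flat
-- ===== Notes on version B (the rewrite author's own statement) =====
-- stated objective: alternative
-- what changed: Instead of filtering idx != jdx inside a nested enumerate, B builds the unfiltered full Cartesian product in one pass and then removes the n diagonal self-pairs by index arithmetic (del flat[i*n+i], back-to-front) in a second pass.
import Mathlib
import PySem

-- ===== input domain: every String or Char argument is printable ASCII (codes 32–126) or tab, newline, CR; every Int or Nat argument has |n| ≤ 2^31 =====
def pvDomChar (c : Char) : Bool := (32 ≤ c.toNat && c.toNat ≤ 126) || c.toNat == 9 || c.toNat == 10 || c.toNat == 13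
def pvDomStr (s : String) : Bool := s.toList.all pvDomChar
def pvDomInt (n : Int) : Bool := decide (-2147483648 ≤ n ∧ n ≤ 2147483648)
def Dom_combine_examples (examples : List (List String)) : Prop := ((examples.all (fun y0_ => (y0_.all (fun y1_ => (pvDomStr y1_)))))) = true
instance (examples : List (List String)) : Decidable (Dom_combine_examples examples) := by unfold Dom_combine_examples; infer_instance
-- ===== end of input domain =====

-- B replaces A's filtered nested enumerate by two stages: build the FULL Cartesian
-- product, then delete the n diagonal self-pairs by index arithmetic (alternative, same cost).

-- ===== PORT A =====
-- nested comprehension: for idx,first in enumerate(examples) for jdx,second in enumerate(examples) if idx != jdx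
def combine_examples (examples : List (List String)) : List (List String) :=
  (PySem.List.enumerate examples 0).flatMap (fun p =>
    (PySem.List.enumerate examples 0).flatMap (fun q =>
      if p.1 ≠ q.1 then [p.2 ++ q.2] else []))

-- ===== PORT B =====
-- flat = [a + b for a in examples for b in examples]; then
-- for i in range(n-1, -1, -1): del flat[i*n+i]
-- 'del flat[k]' with 0 ≤ k < len(flat) (always the case here) is exactly eraseIdx k.toNat.
def combine_examples_alt (examples : List (List String)) : List (List String) :=
  let n : Int := examples.length
  let flat := examples.flatMap (fun a => examples.map (fun b => a ++ b))
  (PySem.List.pyRange (n - 1) (-1) (-1)).foldl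
    (fun flat i => flat.eraseIdx (i * n + i).toNat) flat

-- ===== PRECONDITION & SPEC =====
def Spec_combine_examples (examples : List (List String)) (out : List (List String)) : Prop := out = combine_examples_alt examples
instance (examples : List (List String)) (out : List (List String)) : Decidable (Spec_combine_examples examples out) := by unfold Spec_combine_examples; infer_instance

-- ===== CLAIM (what is proved, stated in full; the proofs are below) =====
def Claim_equal_combine_examples : Prop := ∀ (examples : List (List String)), Dom_combine_examples examples → Spec_combine_examples examples (combine_examples examples)

-- ===== LEMMAS AND PROOFS =====

theorem pv_flatMap_congr_mem {α β : Type} (l : List α) (f g : α → List β)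
    (h : ∀ x ∈ l, f x = g x) : l.flatMap f = l.flatMap g := by
  simp only [List.flatMap_def]
  rw [List.map_congr_left h]

-- inner A-filter over an enumerate whose indices all exceed c: the test is always true
theorem pv_inner_all_ne (x : List String) (ys : List (List String)) (t c : Int) (hc : c < t) :
    (PySem.List.enumerate ys t).flatMap
      (fun q => if c ≠ q.1 then [x ++ q.2] else []) = ys.map (fun s => x ++ s) := by
  induction ys generalizing t with
  | nil => simp [PySem.List.enumerate_nil]
  | cons y ys ih =>
      rw [PySem.List.enumerate_cons, List.flatMap_cons, ih (t + 1) (by omega)]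
      simp [hc.ne]

-- inner A-filter characterisation: skipping index s+k yields take k ++ drop (k+1)
theorem pv_inner_eq (x : List String) (xs : List (List String)) (s : Int) (k : Nat) :
    (PySem.List.enumerate xs s).flatMap
      (fun q => if s + (k : Int) ≠ q.1 then [x ++ q.2] else []) =
    (xs.take k ++ xs.drop (k + 1)).map (fun second => x ++ second) := by
  induction xs generalizing s k with
  | nil => simp [PySem.List.enumerate_nil]
  | cons y ys ih =>
      rw [PySem.List.enumerate_cons, List.flatMap_cons]
      cases k with
      | zero =>
          have h0 : ¬ (s + ((0 : Nat) : Int) ≠ s) := by omega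
          rw [if_neg h0]
          rw [pv_inner_all_ne x ys (s + 1) (s + ((0 : Nat) : Int)) (by omega)]
          simp
      | succ j =>
          have h1 : s + ((j + 1 : Nat) : Int) ≠ s := by omega
          rw [if_pos h1]
          have hf : (fun q : Int × List String => if s + ((j + 1 : Nat) : Int) ≠ q.1 then [x ++ q.2] else [])
              = (fun q : Int × List String => if (s + 1) + ((j : Nat) : Int) ≠ q.1 then [x ++ q.2] else []) := by
            funext q
            have : s + ((j + 1 : Nat) : Int) = (s + 1) + ((j : Nat) : Int) := by push_cast; ring
            rw [this]
          rw [hf, ih (s + 1) j]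
          simp

-- enumerate commutes with map (on the values)
theorem pv_enumerate_map {α β : Type} (l : List α) (f : α → β) (s : Int) :
    PySem.List.enumerate (l.map f) s = (PySem.List.enumerate l s).map (fun p => (p.1, f p.2)) := by
  induction l generalizing s with
  | nil => simp [PySem.List.enumerate_nil]
  | cons x xs ih => rw [List.map_cons, PySem.List.enumerate_cons, PySem.List.enumerate_cons, ih]; simp

-- flatten of constant-width rows has length (#rows) * n
theorem pv_flatten_length {α : Type} (n : Nat) (rows : List (List α))
    (h : ∀ r ∈ rows, r.length = n) : rows.flatten.length = rows.length * n := by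
  induction rows with
  | nil => simp
  | cons r rs ih =>
      simp only [List.flatten_cons, List.length_append, List.length_cons,
        h r List.mem_cons_self, ih (fun r hr => h r (List.mem_cons_of_mem _ hr))]
      ring

-- the diagonal-deletion loop: deleting positions i*n+i for i = #rows-1 .. 0 from
-- the flattened rows (each of width n, #rows ≤ n) removes entry i of row i
theorem pv_delDiag (n : Nat) (m : Int) (rows : List (List (List String))) (B : List (List String))
    (hm2 : m = rows.length) (hlen : ∀ r ∈ rows, r.length = n) (hm : rows.length ≤ n) :
    (PySem.List.pyRange (m - 1) (-1) (-1)).foldl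
      (fun l (i : Int) => l.eraseIdx (i * (n : Int) + i).toNat) (rows.flatten ++ B)
    = (PySem.List.enumerate rows 0).flatMap (fun p => p.2.eraseIdx p.1.toNat) ++ B := by
  subst hm2
  induction rows using List.reverseRecOn generalizing B with
  | nil =>
      rw [show ((([] : List (List (List String))).length : Int) - 1) = -1 by simp,
        PySem.List.pyRange_neg_one_eq_nil le_rfl]
      simp [PySem.List.enumerate_nil]
  | append_singleton rs r ih =>
      have hm' : rs.length < n := by simpa using hm
      have hr : r.length = n := hlen r (by simp)
      have hrs : ∀ x ∈ rs, x.length = n := fun x hx => hlen x (by simp [hx])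
      have hcons : PySem.List.pyRange (((rs ++ [r]).length : Int) - 1) (-1) (-1)
          = ((rs.length : Int)) :: PySem.List.pyRange ((rs.length : Int) - 1) (-1) (-1) := by
        have : (((rs ++ [r]).length : Int) - 1) = (rs.length : Int) := by
          simp [List.length_append]
        rw [this, PySem.List.pyRange_neg_one_cons (by omega)]
      rw [hcons, List.foldl_cons]
      have hflat : (rs ++ [r]).flatten ++ B = rs.flatten ++ (r ++ B) := by
        simp [List.flatten_append]
      rw [hflat]
      have hidx : (((rs.length : Int)) * (n : Int) + (rs.length : Int)).toNat
          = rs.flatten.length + rs.length := by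
        rw [pv_flatten_length n rs hrs]
        omega
      rw [hidx, List.eraseIdx_append_of_length_le (by omega) (r ++ B)]
      have hsub : rs.flatten.length + rs.length - rs.flatten.length = rs.length := by omega
      rw [hsub, List.eraseIdx_append_of_lt_length (by omega) B, ih (r.eraseIdx rs.length ++ B) hrs (by omega)]
      rw [PySem.List.enumerate_append, List.flatMap_append]
      simp [PySem.List.enumerate_cons, PySem.List.enumerate_nil]

-- ===== VERDICT (by name: the statement is the Claim_ definition above) =====
theorem combine_examples_spec : Claim_equal_combine_examples := by
  intro examples _
  unfold Spec_combine_examples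
  show combine_examples examples =
    (PySem.List.pyRange ((examples.length : Int) - 1) (-1) (-1)).foldl
      (fun flat i => flat.eraseIdx (i * (examples.length : Int) + i).toNat)
      (examples.flatMap (fun a => examples.map (fun b => a ++ b)))
  have hflat : examples.flatMap (fun a => examples.map (fun b => a ++ b))
      = (examples.map (fun a => examples.map (fun b => a ++ b))).flatten ++ [] := by
    simp [List.flatMap_def]
  have hdel := pv_delDiag examples.length ((examples.length : Int))
      (examples.map (fun a => examples.map (fun b => a ++ b))) []
      (by simp)
      (by intro r hr; rcases List.mem_map.mp hr with ⟨a, _, rfl⟩; simp)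
      (by simp)
  rw [hflat, hdel]
  rw [pv_enumerate_map, List.flatMap_map, List.append_nil]
  unfold combine_examples
  apply pv_flatMap_congr_mem
  intro p hp
  rcases ((PySem.List.mem_enumerate_iff _ _ _).mp hp) with ⟨k, hk, rfl⟩
  rw [pv_inner_eq examples[k] examples 0 k]
  rw [show ((0 : Int) + (k : Int)).toNat = k by omega]
  rw [List.eraseIdx_map, List.eraseIdx_eq_take_drop_succ]
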